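-- pv_equiv track=rewrite | github.com/tradedgesystem/mlb-unicorn-engine | backend/app/tools/fangraphs_fetch.py | _dedupe_headers
-- ===== SOURCE A (Python) =====
-- def _dedupe_headers(headers: list[str]) -> list[str]:
--     seen: dict[str, int] = {}
--     deduped = []
--     for header in headers:
--         count = seen.get(header, 0)
--         deduped.append(f"{header}_{count}" if count else header)
--         seen[header] = count + 1
--     return deduped
-- ===== SOURCE B (Python) =====
-- def _dedupe_headers(headers: list[str]) -> list[str]:
--     positions: dict[str, list[int]] = {}
--     for i, h in enumerate(headers):
--         positions.setdefault(h, []).append(i)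
--     result = [""] * len(headers)
--     for h, idxs in positions.items():
--         for occ, i in enumerate(idxs):
--             result[i] = h if occ == 0 else f"{h}_{occ}"
--     return result
-- ===== Notes on version B (the rewrite author's own statement) =====
-- stated objective: alternative
-- what changed: Replaced A's single pass with a running per-name counter dict by a two-phase grouping: first collect each name's occurrence indices in a dict, then fill a preallocated result list by position, suffixing each occurrence with its rank within its group.
import Mathlib
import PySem

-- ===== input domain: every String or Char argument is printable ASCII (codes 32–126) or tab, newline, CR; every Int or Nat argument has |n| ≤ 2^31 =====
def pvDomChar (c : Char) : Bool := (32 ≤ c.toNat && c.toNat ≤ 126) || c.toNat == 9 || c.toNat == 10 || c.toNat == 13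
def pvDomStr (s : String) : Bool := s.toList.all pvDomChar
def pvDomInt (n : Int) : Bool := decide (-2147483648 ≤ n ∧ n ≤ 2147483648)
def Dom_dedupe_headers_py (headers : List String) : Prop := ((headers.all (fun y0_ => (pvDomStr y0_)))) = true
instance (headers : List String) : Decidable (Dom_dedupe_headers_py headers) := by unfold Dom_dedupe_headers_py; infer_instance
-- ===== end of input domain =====

-- B replaces A's single running-counter pass with two passes: group the occurrence
-- indices of each name in a dict, then fill an output list by position; objective: alternative decomposition, same cost class.

-- ===== PORT A =====
-- literal port of A: one fold over the headers carrying (seen : dict, deduped : list)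
def dedupe_headers_py (headers : List String) : List String :=
  (headers.foldl
    (fun (st : PySem.Dict String Int × List String) header =>
      let count := st.1.getD header 0
      (st.1.insert header (count + 1),
       st.2 ++ [if count ≠ 0 then header ++ "_" ++ PySem.Int.toStr count else header]))
    (PySem.Dict.empty, [])).2

-- ===== PORT B =====
-- literal port of B: build positions : dict name → list of indices (setdefault+append = modify),
-- then fill result (["" ] * len) at each index from the occurrence rank within its group
def dedupe_headers_py_alt (headers : List String) : List String :=
  let positions : PySem.Dict String (List Int) :=
    (PySem.List.enumerate headers).foldl
      (fun d p => d.modify p.2 [] (fun l => l ++ [p.1])) PySem.Dict.empty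
  positions.items.foldl
    (fun result q =>
      (PySem.List.enumerate q.2).foldl
        (fun r e => PySem.List.pySetD r e.2
          (if e.1 = 0 then q.1 else q.1 ++ "_" ++ PySem.Int.toStr e.1)) result)
    (List.replicate headers.length "")

-- ===== PRECONDITION & SPEC =====
def Spec_dedupe_headers_py (headers : List String) (out : List String) : Prop := out = dedupe_headers_py_alt headers
instance (headers : List String) (out : List String) : Decidable (Spec_dedupe_headers_py headers out) := by unfold Spec_dedupe_headers_py; infer_instance

-- ===== CLAIM (what is proved, stated in full; the proofs are below) =====
def Claim_equal_dedupe_headers_py : Prop := ∀ (headers : List String), Dom_dedupe_headers_py headers → Spec_dedupe_headers_py headers (dedupe_headers_py headers)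

-- ===== LEMMAS AND PROOFS =====

-- the rendered name at a position whose header is h and whose prefix contains h `c` times
def pvRender (h : String) (c : Nat) : String :=
  if c = 0 then h else h ++ "_" ++ PySem.Int.toStr (c : Int)

-- the per-prefix specification of the output
def pvSpec (pre suf : List String) : List String :=
  match suf with
  | [] => []
  | h :: t => pvRender h (pre.count h) :: pvSpec (pre ++ [h]) t

-- the value both programs put at position j
def pvTarget (headers : List String) (j : Nat) : String :=
  pvRender (headers.getD j "") ((headers.take j).count (headers.getD j ""))

-- the (Int) indices at which h occurs in suf, offset by s
def pvPosIdx : List String → Nat → String → List Int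
  | [], _, _ => []
  | x :: t, s, h => (if x = h then [(s : Int)] else []) ++ pvPosIdx t (s + 1) h

lemma pvPosIdx_cons (x : String) (t : List String) (s : Nat) (h : String) :
    pvPosIdx (x :: t) s h = (if x = h then [(s : Int)] else []) ++ pvPosIdx t (s + 1) h := rfl

-- the three lambdas of port B, named for the lemmas
def pvStep1 (d : PySem.Dict String (List Int)) (p : Int × String) : PySem.Dict String (List Int) :=
  d.modify p.2 [] (fun l => l ++ [p.1])
def pvFillG (h : String) (r : List String) (e : Int × Int) : List String :=
  PySem.List.pySetD r e.2 (if e.1 = 0 then h else h ++ "_" ++ PySem.Int.toStr e.1)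
def pvFillF (r : List String) (q : String × List Int) : List String :=
  (PySem.List.enumerate q.2).foldl (pvFillG q.1) r

lemma pv_alt_eq (headers : List String) :
    dedupe_headers_py_alt headers =
      ((PySem.List.enumerate headers).foldl pvStep1 PySem.Dict.empty).items.foldl pvFillF
        (List.replicate headers.length "") := rfl

lemma pv_A_loop (suf : List String) : ∀ (pre : List String) (d : PySem.Dict String Int)
    (acc : List String), (∀ h, d.getD h 0 = (pre.count h : Int)) →
    (suf.foldl
      (fun (st : PySem.Dict String Int × List String) header =>
        let count := st.1.getD header 0
        (st.1.insert header (count + 1),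
         st.2 ++ [if count ≠ 0 then header ++ "_" ++ PySem.Int.toStr count else header]))
      (d, acc)).2 = acc ++ pvSpec pre suf := by
  induction suf with
  | nil => intro pre d acc _; simp [pvSpec]
  | cons h t ih =>
    intro pre d acc hd
    simp only [List.foldl_cons]
    rw [ih (pre ++ [h]) _ _ ?_]
    · simp only [pvSpec, pvRender, hd h]
      by_cases hc : pre.count h = 0 <;> simp [hc]
    · intro x
      rw [PySem.Dict.getD_insert, hd h]
      by_cases hx : x = h
      · simp [hx, List.count_append]
      · simp [hx, Ne.symm hx, hd x, List.count_append]

lemma pv_spec_getElem? (suf : List String) : ∀ (pre : List String) (j : Nat),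
    (pvSpec pre suf)[j]? = (suf[j]?).map (fun x => pvRender x ((pre ++ suf.take j).count x)) := by
  induction suf with
  | nil => intro pre j; simp [pvSpec]
  | cons h t ih =>
    intro pre j
    cases j with
    | zero => simp [pvSpec]
    | succ j => simp only [pvSpec, List.getElem?_cons_succ, ih (pre ++ [h]) j,
        List.take_succ_cons, List.append_assoc, List.singleton_append]

lemma pv_pos_getD (suf : List String) : ∀ (s : Nat) (d : PySem.Dict String (List Int)) (x : String),
    ((PySem.List.enumerate suf (s : Int)).foldl pvStep1 d).getD x [] =
      d.getD x [] ++ pvPosIdx suf s x := by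
  induction suf with
  | nil => intro s d x; simp [PySem.List.enumerate_nil, pvPosIdx]
  | cons h t ih =>
    intro s d x
    rw [PySem.List.enumerate_cons, List.foldl_cons,
      show ((s : Int) + 1) = ((s + 1 : Nat) : Int) by push_cast; ring, ih (s + 1)]
    rw [pvPosIdx_cons]
    unfold pvStep1
    rw [PySem.Dict.getD_modify]
    by_cases hx : x = h
    · simp [hx]
    · simp [hx, Ne.symm hx]

lemma pv_pos_nodup (suf : List String) : ∀ (s : Int) (d : PySem.Dict String (List Int)),
    d.keys.Nodup → ((PySem.List.enumerate suf s).foldl pvStep1 d).keys.Nodup := by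
  induction suf with
  | nil => intro s d hd; simpa [PySem.List.enumerate_nil] using hd
  | cons h t ih =>
    intro s d hd
    rw [PySem.List.enumerate_cons, List.foldl_cons]
    exact ih (s + 1) _ (by rw [pvStep1, PySem.Dict.keys_modify]
                           exact PySem.Dict.nodup_keys_insert _ _ _ hd)

lemma pv_contains_mono (suf : List String) : ∀ (s : Int) (d : PySem.Dict String (List Int))
    (x : String), d.contains x = true →
    ((PySem.List.enumerate suf s).foldl pvStep1 d).contains x = true := by
  induction suf with
  | nil => intro s d x hx; simpa [PySem.List.enumerate_nil] using hx
  | cons h t ih =>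
    intro s d x hx
    rw [PySem.List.enumerate_cons, List.foldl_cons]
    exact ih (s + 1) _ _ (by rw [pvStep1, PySem.Dict.contains_modify]; simp [hx])

lemma pv_pos_contains (suf : List String) : ∀ (s : Int) (d : PySem.Dict String (List Int))
    (x : String), x ∈ suf →
    ((PySem.List.enumerate suf s).foldl pvStep1 d).contains x = true := by
  induction suf with
  | nil => intro s d x hx; simp at hx
  | cons h t ih =>
    intro s d x hx
    rw [PySem.List.enumerate_cons, List.foldl_cons]
    rcases List.mem_cons.mp hx with rfl | hx
    · exact pv_contains_mono t _ _ _ (by rw [pvStep1, PySem.Dict.contains_modify]; simp)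
    · exact ih (s + 1) _ _ hx

lemma pv_fillG_len (h : String) (idxs : List Int) : ∀ (c : Int) (r : List String),
    ((PySem.List.enumerate idxs c).foldl (pvFillG h) r).length = r.length := by
  induction idxs with
  | nil => intro c r; simp [PySem.List.enumerate_nil]
  | cons i t ih =>
    intro c r
    rw [PySem.List.enumerate_cons, List.foldl_cons, ih (c + 1)]
    simp [pvFillG, PySem.List.length_pySetD]

lemma pv_fill_group (h : String) (suf : List String) : ∀ (s occ0 : Nat) (r : List String),
    s + suf.length ≤ r.length → ∀ (j : Nat),
    ((PySem.List.enumerate (pvPosIdx suf s h) (occ0 : Int)).foldl (pvFillG h) r)[j]? =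
      if s ≤ j ∧ j - s < suf.length ∧ suf[j - s]? = some h
      then some (pvRender h (occ0 + (suf.take (j - s)).count h))
      else r[j]? := by
  induction suf with
  | nil => intro s occ0 r _ j; simp [pvPosIdx, PySem.List.enumerate_nil]
  | cons x t ih =>
    intro s occ0 r hlen j
    simp only [List.length_cons] at hlen
    rw [pvPosIdx_cons]
    by_cases hx : x = h
    · subst hx
      rw [if_pos rfl, List.singleton_append, PySem.List.enumerate_cons, List.foldl_cons]
      have hv : pvFillG x r ((occ0 : Int), (s : Int)) = r.set s (pvRender x occ0) := by
        simp [pvFillG, PySem.List.pySetD_natCast, pvRender]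
      rw [hv, show ((occ0 : Int) + 1) = ((occ0 + 1 : Nat) : Int) by push_cast; ring,
        ih (s + 1) (occ0 + 1) _ (by rw [List.length_set]; omega) j]
      rcases Nat.lt_trichotomy j s with hj | rfl | hj
      · rw [if_neg (by omega), if_neg (by omega), List.getElem?_set, if_neg (by omega)]
      · rw [if_neg (by omega), if_pos ⟨le_refl _, by simp, by simp⟩,
          List.getElem?_set_self (by omega)]
        simp
      · obtain ⟨k, rfl⟩ : ∃ k, j = s + 1 + k := ⟨j - s - 1, by omega⟩
        have h1 : s + 1 + k - s = k + 1 := by omega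
        have h2 : s + 1 + k - (s + 1) = k := by omega
        rw [h1, h2]
        simp only [List.getElem?_cons_succ, List.take_succ_cons, List.length_cons]
        by_cases hc : k < t.length ∧ t[k]? = some x
        · rw [if_pos ⟨by omega, hc.1, hc.2⟩, if_pos ⟨by omega, by omega, hc.2⟩]
          have hcnt : List.count x (x :: List.take k t) = List.count x (List.take k t) + 1 := by
            simp
          rw [hcnt, show occ0 + 1 + List.count x (List.take k t)
              = occ0 + (List.count x (List.take k t) + 1) from by omega]
        · rw [if_neg (by rintro ⟨-, h4, h5⟩; exact hc ⟨h4, h5⟩),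
            if_neg (by rintro ⟨-, h4, h5⟩; exact hc ⟨by omega, h5⟩),
            List.getElem?_set, if_neg (by omega)]
    · rw [if_neg hx, List.nil_append, ih (s + 1) occ0 r (by omega) j]
      have hbeq : (x == h) = false := by simpa using hx
      rcases Nat.lt_trichotomy j s with hj | rfl | hj
      · rw [if_neg (by omega), if_neg (by omega)]
      · rw [if_neg (by omega), if_neg (by
          rintro ⟨-, -, h5⟩
          rw [Nat.sub_self, List.getElem?_cons_zero] at h5
          injection h5 with h6
          exact hx h6)]
      · obtain ⟨k, rfl⟩ : ∃ k, j = s + 1 + k := ⟨j - s - 1, by omega⟩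
        have h1 : s + 1 + k - s = k + 1 := by omega
        have h2 : s + 1 + k - (s + 1) = k := by omega
        rw [h1, h2]
        simp only [List.getElem?_cons_succ, List.take_succ_cons, List.length_cons]
        by_cases hc : k < t.length ∧ t[k]? = some h
        · rw [if_pos ⟨by omega, hc.1, hc.2⟩, if_pos ⟨by omega, by omega, hc.2⟩]
          have hcnt : List.count h (x :: List.take k t) = List.count h (List.take k t) := by
            simp [List.count_cons, hbeq]
          rw [hcnt]
        · rw [if_neg (by rintro ⟨-, h4, h5⟩; exact hc ⟨h4, h5⟩),
            if_neg (by rintro ⟨-, h4, h5⟩; exact hc ⟨by omega, h5⟩)]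

lemma pv_fill_outer (headers : List String) (gs : List (String × List Int)) :
    ∀ (r : List String), r.length = headers.length →
    (∀ g ∈ gs, g.2 = pvPosIdx headers 0 g.1) →
    ∀ (j : Nat), (gs.foldl pvFillF r)[j]? =
      if j < headers.length ∧ (headers.getD j "") ∈ gs.map Prod.fst
      then some (pvTarget headers j)
      else r[j]? := by
  induction gs with
  | nil => intro _ _ j; simp
  | cons g gs ih =>
    intro r hlen hgs j
    rw [List.foldl_cons]
    have hg2 : g.2 = pvPosIdx headers 0 g.1 := hgs g (List.mem_cons_self ..)
    have hfill : (pvFillF r g)[j]? =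
        if j < headers.length ∧ headers[j]? = some g.1
        then some (pvRender g.1 ((headers.take j).count g.1))
        else r[j]? := by
      unfold pvFillF
      rw [hg2, show (0 : Int) = ((0 : Nat) : Int) from by simp,
        pv_fill_group g.1 headers 0 0 r (by omega) j]
      simp only [Nat.sub_zero, Nat.zero_le, true_and, Nat.zero_add]
    have hlen' : (pvFillF r g).length = r.length := pv_fillG_len g.1 g.2 0 r
    rw [ih (pvFillF r g) (by rw [hlen']; exact hlen)
      (fun g' hg' => hgs g' (List.mem_cons_of_mem _ hg')) j]
    simp only [List.map_cons, List.mem_cons]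
    by_cases hjn : j < headers.length
    · have hsome : headers[j]? = some (headers.getD j "") := by
        rw [List.getD_eq_getElem?_getD, List.getElem?_eq_getElem hjn]; rfl
      by_cases hmem : headers.getD j "" ∈ gs.map Prod.fst
      · rw [if_pos ⟨hjn, hmem⟩, if_pos ⟨hjn, Or.inr hmem⟩]
      · rw [if_neg (by rintro ⟨-, hm⟩; exact hmem hm), hfill]
        by_cases hhead : headers[j]? = some g.1
        · have hgd : headers.getD j "" = g.1 := by
            rw [List.getD_eq_getElem?_getD, hhead]; rfl
          rw [if_pos ⟨hjn, hhead⟩, if_pos ⟨hjn, Or.inl hgd⟩]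
          unfold pvTarget
          rw [hgd]
        · rw [if_neg (by rintro ⟨-, h5⟩; exact hhead h5), if_neg (by
            rintro ⟨-, h6 | h6⟩
            · exact hhead (h6 ▸ hsome)
            · exact hmem h6)]
    · rw [if_neg (by rintro ⟨h5, -⟩; exact hjn h5), hfill,
        if_neg (by rintro ⟨h5, -⟩; exact hjn h5),
        if_neg (by rintro ⟨h5, -⟩; exact hjn h5)]

lemma pv_B_getElem? (headers : List String) (j : Nat) :
    (dedupe_headers_py_alt headers)[j]? =
      if j < headers.length then some (pvTarget headers j) else none := by
  rw [pv_alt_eq]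
  have hnodup : ((PySem.List.enumerate headers).foldl pvStep1 PySem.Dict.empty).keys.Nodup :=
    pv_pos_nodup headers 0 PySem.Dict.empty (by rw [PySem.Dict.keys_empty]; exact List.nodup_nil)
  have hpos := pv_pos_getD headers 0 PySem.Dict.empty
  simp only [Nat.cast_zero, PySem.Dict.getD_empty, List.nil_append] at hpos
  have hitems : ∀ g ∈ ((PySem.List.enumerate headers).foldl pvStep1 PySem.Dict.empty).items,
      g.2 = pvPosIdx headers 0 g.1 := by
    rintro ⟨k, v⟩ hg
    have := PySem.Dict.getD_of_mem_items _ hg hnodup []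
    rw [hpos k] at this
    exact this.symm
  rw [pv_fill_outer headers _ _ (by simp) hitems j]
  by_cases hj : j < headers.length
  · have hmemh : headers.getD j "" ∈ headers := by
      rw [List.getD_eq_getElem?_getD, List.getElem?_eq_getElem hj]
      exact List.getElem_mem hj
    have hcont := pv_pos_contains headers 0 PySem.Dict.empty _ hmemh
    rw [PySem.Dict.contains_iff_mem_keys] at hcont
    rw [if_pos ⟨hj, by simpa [PySem.Dict.keys] using hcont⟩, if_pos hj]
  · rw [if_neg (by rintro ⟨h5, -⟩; exact hj h5), if_neg hj,
      List.getElem?_eq_none (by rw [List.length_replicate]; omega)]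

-- ===== VERDICT (by name: the statement is the Claim_ definition above) =====
theorem dedupe_headers_py_spec : Claim_equal_dedupe_headers_py := by
  intro headers _
  unfold Spec_dedupe_headers_py
  apply List.ext_getElem?
  intro j
  rw [pv_B_getElem?]
  unfold dedupe_headers_py
  rw [pv_A_loop headers [] PySem.Dict.empty [] (fun h => by simp [PySem.Dict.getD_empty]),
    List.nil_append, pv_spec_getElem?, List.nil_append]
  by_cases hj : j < headers.length
  · rw [List.getElem?_eq_getElem hj]
    simp only [Option.map_some, if_pos hj, pvTarget, List.getD_eq_getElem?_getD,
      List.getElem?_eq_getElem hj, Option.getD_some]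
  · rw [List.getElem?_eq_none (by omega), if_neg hj]; rfl
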